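-- pv_equiv track=rewrite | github.com/mariolciax/Thue_online_play | aplikacja.py | sprawdz_abel
-- ===== SOURCE A (Python) =====
-- def sprawdz_abelowo(slowo, alfabet):  # sprawdzanie repetycji abelowych juz w konkretnych podslowach
--     n = len(slowo)
--     p = int(n / 2)
--     a = len(alfabet)
--     wystapienia_1 = [0 * i for i in range(0, a)]
--     wystapienia_2 = [0 * i for i in range(0, a)]
--     for i in range(0, a):
--         for j in range(0, p):
--             if slowo[j] == alfabet[i]:
--                 wystapienia_1[i] = wystapienia_1[i] + 1
--         for k in range(p, n):
--             if slowo[k] == alfabet[i]: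
--                 wystapienia_2[i] = wystapienia_2[i] + 1  # a.count(x) liczba wystapien elementu x na liscie
--     for g in range(0, a):
--         if wystapienia_1[g] != wystapienia_2[g]:
--             return 0
--     return 1
--
-- def sprawdz_abel(slowo, alfabet):  # przeszukiwanie calego slowa pod wzgledem repetycji abelowych
--     n = len(slowo)
--     m = int(n / 2)
--     for k in range(1, m + 1):
--         w = n - 1 - 2 * (k - 1)  # liczba podslow dlugosci k do sprawdzenia
--         for j in range(0, w):
--             if sprawdz_abelowo(slowo[j:j + 2 * k], alfabet) == 1:
--                 return 1
--     return 0
-- ===== SOURCE B (Python) =====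
-- def sprawdz_abel(slowo, alfabet):
--     # Prefix letter-count table built on demand: pref[i] = occurrences of each
--     # alfabet letter in slowo[:i]; a half-pair (k, j) is tested by comparing
--     # prefix-count differences instead of re-counting the substring.
--     n = len(slowo)
--     for k in range(1, n // 2 + 1):
--         pref = [[0] * len(alfabet)]
--         for j in range(n - 2 * k + 1):
--             while len(pref) <= j + 2 * k:
--                 last = pref[-1]
--                 ch = slowo[len(pref) - 1]
--                 pref.append([c + (ch == l) for c, l in zip(last, alfabet)])
--             if all(a + c == 2 * b for a, (b, c) in
--                    zip(pref[j], zip(pref[j + k], pref[j + 2 * k]))):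
--                 return 1
--     return 0
-- ===== Notes on version B (the rewrite author's own statement) =====
-- stated objective: faster
-- what changed: B maintains an on-demand prefix Parikh (letter-count) table and tests each candidate half-pair by comparing prefix-count differences in O(a), instead of A's re-counting every alphabet letter over every substring from scratch.
import Mathlib
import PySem

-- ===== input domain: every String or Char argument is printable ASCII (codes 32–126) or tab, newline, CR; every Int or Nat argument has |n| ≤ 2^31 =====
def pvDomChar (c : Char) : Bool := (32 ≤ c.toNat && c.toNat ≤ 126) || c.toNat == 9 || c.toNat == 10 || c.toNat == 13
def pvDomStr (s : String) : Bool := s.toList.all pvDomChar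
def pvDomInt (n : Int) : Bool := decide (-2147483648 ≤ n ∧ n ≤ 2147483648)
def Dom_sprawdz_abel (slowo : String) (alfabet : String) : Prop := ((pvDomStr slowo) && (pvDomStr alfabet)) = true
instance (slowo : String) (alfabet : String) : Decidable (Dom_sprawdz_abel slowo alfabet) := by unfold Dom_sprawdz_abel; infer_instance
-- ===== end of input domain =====

-- B replaces A's per-substring letter recount by an on-demand prefix letter-count table,
-- testing each half-pair by prefix-count differences (objective: faster).

-- ===== PORT A =====
-- helper sprawdz_abelowo: per alphabet letter, count it in the first and second half of `sub`
-- (indices j, k are always in range, so `sub[j]? == alf[i]?` is exactly Python's `slowo[j] == alfabet[i]`;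
--  `n / 2` on Nat is exactly Python's `int(n / 2)` for a nonnegative length; list assignment l[i] = v is List.set)
def sprawdzAbelowoA (sub : List Char) (alf : List Char) : Int :=
  let n := sub.length
  let p := n / 2
  let a := alf.length
  let w1 : List Int := (List.range a).map (fun i => 0 * (i : Int))
  let w2 : List Int := (List.range a).map (fun i => 0 * (i : Int))
  let st := (List.range a).foldl
    (fun (st : List Int × List Int) i =>
      ((List.range p).foldl
         (fun w j => if sub[j]? == alf[i]? then w.set i (w.getD i 0 + 1) else w) st.1,
       (List.range' p (n - p)).foldl
         (fun w k => if sub[k]? == alf[i]? then w.set i (w.getD i 0 + 1) else w) st.2))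
    (w1, w2)
  -- 'for g in range(0,a): if w1[g] != w2[g]: return 0' / 'return 1'
  if (List.range a).all (fun g => st.1.getD g 0 == st.2.getD g 0) then 1 else 0

-- the early-return double loop is the obvious `any` over the same ranges
def sprawdz_abel (slowo : String) (alfabet : String) : Int :=
  let s := slowo.toList
  let alf := alfabet.toList
  let n := s.length
  let m := n / 2
  if (List.range' 1 m).any (fun k =>
      let w := n - 1 - 2 * (k - 1)
      (List.range w).any (fun j =>
        sprawdzAbelowoA (PySem.List.slice s (some (j : Int)) (some ((j + 2 * k : Nat) : Int))) alf == 1))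
  then 1 else 0

-- ===== PORT B =====
-- Source B: per k, a prefix count table pref (pref[i][t] = count of alfabet[t] in slowo[:i])
-- is grown on demand by the inner `while` loop, and each (k, j) is tested via
-- pref[j][t] + pref[j+2k][t] == 2*pref[j+k][t]

-- the `while len(pref) <= m:` extension loop (pref[-1] is List.getLastD, pref is never empty;
-- the `none` branch of `slowo[len(pref)-1]` is unreachable, the loop only runs with len(pref)-1 < len(slowo))
def pvExtendTo (s : List Char) (alf : List Char) (pref : List (List Int)) (m : Nat) : List (List Int) :=
  if pref.length ≤ m then
    match s[pref.length - 1]? with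
    | some ch =>
        pvExtendTo s alf
          (pref ++ [List.zipWith (fun c l => if ch == l then c + 1 else c) (pref.getLastD []) alf]) m
    | none => pref
  else pref
termination_by m + 1 - pref.length
decreasing_by simp_all; omega

-- the inner `for j in range(...)` loop with its early `return 1`, threading pref
def pvScanJ (s : List Char) (alf : List Char) (k : Nat) : List Nat → List (List Int) → Bool
  | [], _ => false
  | j :: js, pref =>
      let pref' := pvExtendTo s alf pref (j + 2 * k)
      if (List.zip (pref'.getD j []) (List.zip (pref'.getD (j + k) []) (pref'.getD (j + 2 * k) []))).all
           (fun t => t.1 + t.2.2 == 2 * t.2.1)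
      then true
      else pvScanJ s alf k js pref'

def sprawdz_abel_alt (slowo : String) (alfabet : String) : Int :=
  let s := slowo.toList
  let alf := alfabet.toList
  let n := s.length
  if (List.range' 1 (n / 2)).any (fun k =>
      pvScanJ s alf k (List.range (n - 2 * k + 1)) [List.replicate alf.length 0])
  then 1 else 0

-- ===== PRECONDITION & SPEC =====
def Spec_sprawdz_abel (slowo : String) (alfabet : String) (out : Int) : Prop := out = sprawdz_abel_alt slowo alfabet
instance (slowo : String) (alfabet : String) (out : Int) : Decidable (Spec_sprawdz_abel slowo alfabet out) := by unfold Spec_sprawdz_abel; infer_instance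

-- ===== CLAIM (what is proved, stated in full; the proofs are below) =====
def Claim_equal_sprawdz_abel : Prop := ∀ (slowo : String) (alfabet : String), Dom_sprawdz_abel slowo alfabet → Spec_sprawdz_abel slowo alfabet (sprawdz_abel slowo alfabet)

-- ===== LEMMAS AND PROOFS =====
lemma pvFoldSeg (sub : List Char) (c : Option Char) :
    ∀ (q pstart : Nat) (w : List Int) (i : Nat), i < w.length → pstart + q ≤ sub.length →
    (List.range' pstart q).foldl (fun w j => if sub[j]? == c then w.set i (w.getD i 0 + 1) else w) w
      = w.set i (w.getD i 0 + (((sub.drop pstart).take q).countP (fun x => some x == c) : Int)) := by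
  intro q
  induction q with
  | zero =>
      intro pstart w i hi _
      simp [List.getD, List.getElem?_eq_getElem (by simpa using hi)]
  | succ q ih =>
      intro pstart w i hi hle
      have hp : pstart < sub.length := by omega
      rw [List.range'_succ, List.foldl_cons]
      have hdrop : sub.drop pstart = sub[pstart] :: sub.drop (pstart + 1) :=
        List.drop_eq_getElem_cons hp
      have hget : sub[pstart]? = some sub[pstart] := List.getElem?_eq_getElem hp
      rw [hdrop, List.take_succ_cons, List.countP_cons, hget]
      by_cases hb : (some sub[pstart] == c) = true
      · rw [if_pos hb]
        rw [ih (pstart + 1) _ i (by simpa using hi) (by omega)]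
        rw [List.set_set]
        have hg : (w.set i (w.getD i 0 + 1)).getD i 0 = w.getD i 0 + 1 := by
          simp [List.getD, hi]
        rw [hg, hb]
        simp only [if_true]
        congr 1
        push_cast
        ring
      · rw [if_neg hb]
        rw [ih (pstart + 1) _ i hi (by omega)]
        simp only [Bool.not_eq_true] at hb
        rw [hb]
        simp

-- pure set-fold, getD of result
lemma pvFoldSetGetD (g : Nat → Int) :
    ∀ (l : List Nat) (w : List Int) (t : Nat), l.Nodup → (∀ i ∈ l, i < w.length) →
    (l.foldl (fun w i => w.set i (w.getD i 0 + g i)) w).getD t 0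
      = w.getD t 0 + (if t ∈ l then g t else 0) := by
  intro l
  induction l with
  | nil => intro w t _ _; simp
  | cons x xs ih =>
      intro w t hnd hlt
      rw [List.foldl_cons]
      rw [ih _ t hnd.of_cons (by intro i hi; simpa using hlt i (List.mem_cons_of_mem _ hi))]
      by_cases ht : t = x
      · subst ht
        have hx : t ∈ t :: xs := List.mem_cons_self
        have htx : t ∉ xs := by
          have := hnd; rw [List.nodup_cons] at this; exact this.1
        rw [if_neg htx, if_pos hx]
        have : (w.set t (w.getD t 0 + g t)).getD t 0 = w.getD t 0 + g t := by
          simp [List.getD, hlt t hx]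
        rw [this]; ring
      · have : (w.set x (w.getD x 0 + g x)).getD t 0 = w.getD t 0 := by
          simp [List.getD, List.getElem?_set_ne (Ne.symm ht)]
        rw [this]
        simp [List.mem_cons, ht]

lemma pvAllCongr {α : Type} (l : List α) (p q : α → Bool) (h : ∀ x ∈ l, p x = q x) : l.all p = l.all q := by
  induction l with
  | nil => rfl
  | cons x xs ih => simp only [List.all_cons, h x (by simp), ih (fun y hy => h y (List.mem_cons_of_mem _ hy))]
lemma pvFoldFoldEq (sub : List Char) (alf : List Char) (pstart q : Nat) (hq : pstart + q ≤ sub.length) :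
    ∀ (l : List Nat) (w : List Int), (∀ i ∈ l, i < w.length) →
    l.foldl (fun w i => (List.range' pstart q).foldl
        (fun w j => if sub[j]? == alf[i]? then w.set i (w.getD i 0 + 1) else w) w) w
      = l.foldl (fun w i => w.set i (w.getD i 0
          + (((sub.drop pstart).take q).countP (fun x => some x == alf[i]?) : Int))) w := by
  intro l
  induction l with
  | nil => intro w _; rfl
  | cons x xs ih =>
      intro w hlt
      rw [List.foldl_cons, List.foldl_cons, pvFoldSeg sub (alf[x]?) q pstart w x (hlt x (by simp)) hq]
      exact ih _ (by intro i hi; simpa using hlt i (List.mem_cons_of_mem _ hi))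

lemma pvAbelowoEq (sub alf : List Char) :
    sprawdzAbelowoA sub alf =
      if (List.range alf.length).all (fun t =>
          (((sub.take (sub.length / 2)).countP (fun x => some x == alf[t]?) : Int)
            == ((sub.drop (sub.length / 2)).countP (fun x => some x == alf[t]?) : Int)))
      then 1 else 0 := by
  have hw1 : (List.range alf.length).map (fun i => 0 * (i : Int)) = List.replicate alf.length 0 := by
    simp
  have hgD : ∀ t, (List.replicate alf.length (0 : Int)).getD t 0 = 0 := by
    intro t; rcases lt_or_ge t alf.length with h | h <;> simp [List.getD, h]
  have hlen : ∀ i ∈ List.range alf.length, i < (List.replicate alf.length (0 : Int)).length := by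
    intro i hi; simpa using List.mem_range.mp hi
  unfold sprawdzAbelowoA
  simp only [hw1]
  have hsplit : (List.range alf.length).foldl
      (fun (st : List Int × List Int) i =>
        ((List.range (sub.length / 2)).foldl
           (fun w j => if sub[j]? == alf[i]? then w.set i (w.getD i 0 + 1) else w) st.1,
         (List.range' (sub.length / 2) (sub.length - sub.length / 2)).foldl
           (fun w k => if sub[k]? == alf[i]? then w.set i (w.getD i 0 + 1) else w) st.2))
      (List.replicate alf.length 0, List.replicate alf.length 0)
      = ((List.range alf.length).foldl (fun w i => (List.range (sub.length / 2)).foldl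
           (fun w j => if sub[j]? == alf[i]? then w.set i (w.getD i 0 + 1) else w) w)
          (List.replicate alf.length 0),
         (List.range alf.length).foldl (fun w i => (List.range' (sub.length / 2) (sub.length - sub.length / 2)).foldl
           (fun w k => if sub[k]? == alf[i]? then w.set i (w.getD i 0 + 1) else w) w)
          (List.replicate alf.length 0)) :=
    PySem.List.foldl_prod_mk
      (f := fun (w : List Int) (i : Nat) => (List.range (sub.length / 2)).foldl
         (fun w j => if sub[j]? == alf[i]? then w.set i (w.getD i 0 + 1) else w) w)
      (g := fun (w : List Int) (i : Nat) => (List.range' (sub.length / 2) (sub.length - sub.length / 2)).foldl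
         (fun w k => if sub[k]? == alf[i]? then w.set i (w.getD i 0 + 1) else w) w)
      _ _ _
  rw [hsplit]
  rw [show (List.range (sub.length / 2)) = List.range' 0 (sub.length / 2) from List.range_eq_range']
  rw [pvFoldFoldEq sub alf 0 (sub.length / 2) (by omega) _ _ hlen]
  rw [pvFoldFoldEq sub alf (sub.length / 2) (sub.length - sub.length / 2) (by omega) _ _ hlen]
  have hdt : (sub.drop (sub.length / 2)).take (sub.length - sub.length / 2) = sub.drop (sub.length / 2) := by
    rw [show sub.length - sub.length / 2 = (sub.drop (sub.length / 2)).length by simp]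
    exact List.take_length
  simp only [List.drop_zero, hdt]
  congr 2
  apply pvAllCongr
  intro t ht
  have ht' : t < alf.length := List.mem_range.mp ht
  rw [pvFoldSetGetD _ _ _ t (List.nodup_range) hlen,
      pvFoldSetGetD _ _ _ t (List.nodup_range) hlen]
  rw [hgD t, if_pos ht, if_pos ht]
  simp

def pvProf (alf u : List Char) : List Int := alf.map (fun l => (u.count l : Int))

lemma pvProfNil (alf : List Char) : pvProf alf [] = List.replicate alf.length 0 := by
  simp [pvProf]

lemma pvProfSnoc (alf : List Char) (u : List Char) (ch : Char) :
    List.zipWith (fun c l => if ch == l then c + 1 else c) (pvProf alf u) alf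
      = pvProf alf (u ++ [ch]) := by
  unfold pvProf
  induction alf with
  | nil => rfl
  | cons a as ih =>
      simp only [List.map_cons, List.zipWith_cons_cons, ih, List.cons.injEq, and_true]
      by_cases h : ch == a
      · simp [h, List.count_append, List.count_cons, List.count_nil]
      · simp [h, List.count_append, List.count_cons, List.count_nil]

lemma pvAllRangeGet (l : List Char) (p : Option Char → Bool) :
    (List.range l.length).all (fun t => p l[t]?) = l.all (fun c => p (some c)) := by
  rw [Bool.eq_iff_iff, List.all_eq_true, List.all_eq_true]
  constructor
  · intro h c hc
    obtain ⟨t, ht, rfl⟩ := List.mem_iff_getElem.mp hc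
    have := h t (List.mem_range.mpr ht)
    rwa [List.getElem?_eq_getElem ht] at this
  · intro h t ht
    have ht' : t < l.length := List.mem_range.mp ht
    rw [List.getElem?_eq_getElem ht']
    exact h _ (List.getElem_mem ht')

lemma pvBodyEq (s alf : List Char) (k j : Nat) (hk : 1 ≤ k) (hjk : j + 2 * k ≤ s.length) :
    (sprawdzAbelowoA (PySem.List.slice s (some (j : Int)) (some ((j + 2 * k : Nat) : Int))) alf == 1)
      = (List.zip (pvProf alf (s.take j))
          (List.zip (pvProf alf (s.take (j + k))) (pvProf alf (s.take (j + 2 * k))))).all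
          (fun t => t.1 + t.2.2 == 2 * t.2.1) := by
  rw [PySem.List.slice_natCast]
  have h2k : j + 2 * k - j = 2 * k := by omega
  rw [h2k]
  set sub := (s.drop j).take (2 * k) with hsub
  have hlen : sub.length = 2 * k := by
    simp [hsub]; omega
  have hp : sub.length / 2 = k := by omega
  rw [pvAbelowoEq, hp]
  have htake : sub.take k = (s.drop j).take k := by
    rw [hsub, List.take_take]; congr 1; omega
  have hdropk : sub.drop k = (s.drop (j + k)).take k := by
    rw [hsub, List.drop_take, List.drop_drop]
    have h1 : 2 * k - k = k := by omega
    have h2 : j + k = j + k := rfl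
    rw [h1]
  rw [htake, hdropk]
  -- left side: (if C then 1 else 0) == 1  =  C
  have hif : ∀ (C : Bool), ((if C = true then (1 : Int) else 0) == 1) = C := by
    intro C; cases C <;> simp
  rw [hif]
  -- right side: zip of maps over alf
  unfold pvProf
  rw [List.zip_map', List.zip_map', List.all_map]
  rw [pvAllRangeGet alf (fun o =>
        ((((s.drop j).take k).countP (fun x => some x == o) : Int)
          == (((s.drop (j + k)).take k).countP (fun x => some x == o) : Int)))]
  apply pvAllCongr
  intro c hc
  simp only [Function.comp_def]
  rw [Bool.eq_iff_iff]
  simp only [beq_iff_eq]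
  have e1 : ∀ (l : List Char), l.countP (fun x => some x == some c) = l.count c := by
    intro l; simp [List.count_eq_countP]
  rw [e1, e1]
  have t1 : s.take (j + k) = s.take j ++ (s.drop j).take k := List.take_add
  have t2 : s.take (j + 2 * k) = s.take (j + k) ++ (s.drop (j + k)).take k := by
    have h3 : j + 2 * k = (j + k) + k := by omega
    rw [h3]; exact List.take_add
  rw [t2, t1]
  simp only [List.count_append]
  constructor
  · intro h; omega
  · intro h; omega

def pvCanon (s alf : List Char) (l : Nat) : List (List Int) :=
  (List.range l).map (fun i => pvProf alf (s.take i))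

lemma pvCanonOne (s alf : List Char) : pvCanon s alf 1 = [List.replicate alf.length 0] := by
  simp [pvCanon, pvProfNil]

lemma pvCanonGetD (s alf : List Char) (m i : Nat) (h : i < m) :
    (pvCanon s alf m).getD i [] = pvProf alf (s.take i) := by
  unfold pvCanon
  simp only [List.getD]
  rw [List.getElem?_map, List.getElem?_eq_getElem (by simpa using h)]
  simp

lemma pvCanonSnoc (s alf : List Char) (l : Nat) :
    pvCanon s alf (l + 1) = pvCanon s alf l ++ [pvProf alf (s.take l)] := by
  simp [pvCanon, List.range_succ]

lemma pvCanonLength (s alf : List Char) (l : Nat) : (pvCanon s alf l).length = l := by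
  simp [pvCanon]

lemma pvCanonLast (s alf : List Char) (l : Nat) (hl : 1 ≤ l) :
    (pvCanon s alf l).getLastD [] = pvProf alf (s.take (l - 1)) := by
  obtain ⟨l', rfl⟩ : ∃ l', l = l' + 1 := ⟨l - 1, by omega⟩
  rw [pvCanonSnoc]
  simp

lemma pvExtendEq (s alf : List Char) (m : Nat) (hm : m ≤ s.length) :
    ∀ (d l : Nat), 1 ≤ l → l ≤ m + 1 → m + 1 - l = d →
    pvExtendTo s alf (pvCanon s alf l) m = pvCanon s alf (m + 1) := by
  intro d
  induction d with
  | zero =>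
      intro l hl1 hl2 hd
      have : l = m + 1 := by omega
      subst this
      rw [pvExtendTo]
      rw [if_neg (by rw [pvCanonLength]; omega)]
  | succ d ih =>
      intro l hl1 hl2 hd
      have hlm : l ≤ m := by omega
      rw [pvExtendTo, if_pos (by rw [pvCanonLength]; omega)]
      rw [pvCanonLength]
      have hidx : l - 1 < s.length := by omega
      rw [List.getElem?_eq_getElem hidx]
      simp only []
      rw [pvCanonLast s alf l hl1, pvProfSnoc]
      have htk : s.take (l - 1) ++ [s[l - 1]] = s.take l := by
        obtain ⟨l', rfl⟩ : ∃ l', l = l' + 1 := ⟨l - 1, by omega⟩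
        simp only [Nat.add_sub_cancel]
        rw [List.take_add_one, List.getElem?_eq_getElem (by omega : l' < s.length)]
        rfl
      rw [htk, ← pvCanonSnoc]
      exact ih (l + 1) (by omega) (by omega) (by omega)

lemma pvScanEq (s alf : List Char) (k : Nat) :
    ∀ (c b l : Nat), 1 ≤ l → l ≤ b + 2 * k + 1 → b + c + 2 * k ≤ s.length + 1 →
    pvScanJ s alf k (List.range' b c) (pvCanon s alf l)
      = (List.range' b c).any (fun j =>
          (List.zip (pvProf alf (s.take j))
            (List.zip (pvProf alf (s.take (j + k))) (pvProf alf (s.take (j + 2 * k))))).all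
            (fun t => t.1 + t.2.2 == 2 * t.2.1)) := by
  intro c
  induction c with
  | zero => intro b l _ _ _; rfl
  | succ c ih =>
      intro b l hl1 hl2 hbc
      rw [List.range'_succ]
      rw [pvScanJ]
      have hext : pvExtendTo s alf (pvCanon s alf l) (b + 2 * k) = pvCanon s alf (b + 2 * k + 1) :=
        pvExtendEq s alf (b + 2 * k) (by omega) (b + 2 * k + 1 - l) l hl1 hl2 rfl
      simp only [hext]
      rw [pvCanonGetD s alf _ b (by omega), pvCanonGetD s alf _ (b + k) (by omega),
          pvCanonGetD s alf _ (b + 2 * k) (by omega)]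
      rw [List.any_cons]
      by_cases h : (List.zip (pvProf alf (s.take b))
          (List.zip (pvProf alf (s.take (b + k))) (pvProf alf (s.take (b + 2 * k))))).all
          (fun t => t.1 + t.2.2 == 2 * t.2.1)
      · rw [if_pos h, h]; rfl
      · rw [if_neg h]
        rw [ih (b + 1) (b + 2 * k + 1) (by omega) (by omega) (by omega)]
        rw [Bool.eq_false_iff.mpr h]
        simp

theorem pvMain (slowo alfabet : String) : sprawdz_abel slowo alfabet = sprawdz_abel_alt slowo alfabet := by
  simp only [sprawdz_abel, sprawdz_abel_alt]
  set s := slowo.toList with hs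
  set alf := alfabet.toList with half
  congr 2
  apply PySem.List.any_congr_mem
  intro k hk
  have hk' : 1 ≤ k ∧ k < 1 + s.length / 2 := List.mem_range'_1.mp hk
  have h2k : 2 * k ≤ s.length := by omega
  have hw : s.length - 1 - 2 * (k - 1) = s.length - 2 * k + 1 := by omega
  rw [hw, ← pvCanonOne s alf,
      show List.range (s.length - 2 * k + 1) = List.range' 0 (s.length - 2 * k + 1) from
        List.range_eq_range',
      pvScanEq s alf k (s.length - 2 * k + 1) 0 1 (by omega) (by omega) (by omega)]
  apply PySem.List.any_congr_mem
  intro j hj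
  have hj' : 0 ≤ j ∧ j < 0 + (s.length - 2 * k + 1) := List.mem_range'_1.mp hj
  have hjk : j + 2 * k ≤ s.length := by omega
  exact pvBodyEq s alf k j hk'.1 hjk

-- ===== VERDICT (by name: the statement is the Claim_ definition above) =====
theorem sprawdz_abel_spec : Claim_equal_sprawdz_abel := by
  intro slowo alfabet _
  unfold Spec_sprawdz_abel
  exact pvMain slowo alfabet
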